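-- pv_equiv track=rewrite | github.com/YaelRoman/AppsRedes | visual_password_attack_simulator/utils/password_requirements.py | unmet_requirements
-- ===== SOURCE A (Python) =====
-- import string
-- from typing import List
--
-- PASSWORD_LENGTH = 10
--
-- ALLOWED_SPECIAL_CHARACTERS = "*.-_@=|+<>%&#$"
--
-- FORBIDDEN_CHARACTERS = set("ÑñáéíóúÁÉÍÓÚ")
--
-- ALLOWED_CHARACTERS = string.ascii_letters + string.digits + ALLOWED_SPECIAL_CHARACTERS
--
-- def unmet_requirements(password: str) -> List[str]:
--     """Devuelve una lista de requisitos no cumplidos (para mensajes)."""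
--     missing: List[str] = []
--     if len(password) != PASSWORD_LENGTH:
--         missing.append(f"Tener exactamente {PASSWORD_LENGTH} caracteres.")
--     if any(ch in FORBIDDEN_CHARACTERS for ch in password):
--         missing.append("No contener Ñ, ñ ni vocales acentuadas.")
--     if not all(ch in ALLOWED_CHARACTERS for ch in password):
--         missing.append("Usar únicamente dígitos, letras o los caracteres especiales permitidos.")
--     if not any(ch.islower() for ch in password):
--         missing.append("Incluir al menos una letra minúscula.")
--     if not any(ch.isupper() for ch in password):
--         missing.append("Incluir al menos una letra mayúscula.")
--     if not any(ch.isdigit() for ch in password):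
--         missing.append("Incorporar al menos un dígito.")
--     if not any(ch in ALLOWED_SPECIAL_CHARACTERS for ch in password):
--         missing.append("Agregar al menos un carácter especial permitido (* . - _ @ = | + < > % & # $).")
--     return missing
-- ===== SOURCE B (Python) =====
-- PASSWORD_LENGTH = 10
-- ALLOWED_SPECIAL_CHARACTERS = "*.-_@=|+<>%&#$"
-- FORBIDDEN_CHARACTERS = set("ÑñáéíóúÁÉÍÓÚ")
-- ALLOWED_CHARACTERS = (
--     "abcdefghijklmnopqrstuvwxyzABCDEFGHIJKLMNOPQRSTUVWXYZ0123456789"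
--     + ALLOWED_SPECIAL_CHARACTERS
-- )
--
-- def unmet_requirements(password: str):
--     """One pass over the password collects every character-class fact; the
--     message list is then assembled from the flags in the original order."""
--     has_forbidden = False
--     all_allowed = True
--     has_lower = has_upper = has_digit = has_special = False
--     for ch in password:
--         if ch in FORBIDDEN_CHARACTERS:
--             has_forbidden = True
--         if ch not in ALLOWED_CHARACTERS:
--             all_allowed = False
--         if ch.islower():
--             has_lower = True
--         if ch.isupper():
--             has_upper = True
--         if ch.isdigit():
--             has_digit = True
--         if ch in ALLOWED_SPECIAL_CHARACTERS:
--             has_special = True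
--     missing = []
--     if len(password) != PASSWORD_LENGTH:
--         missing.append(f"Tener exactamente {PASSWORD_LENGTH} caracteres.")
--     if has_forbidden:
--         missing.append("No contener Ñ, ñ ni vocales acentuadas.")
--     if not all_allowed:
--         missing.append("Usar únicamente dígitos, letras o los caracteres especiales permitidos.")
--     if not has_lower:
--         missing.append("Incluir al menos una letra minúscula.")
--     if not has_upper:
--         missing.append("Incluir al menos una letra mayúscula.")
--     if not has_digit:
--         missing.append("Incorporar al menos un dígito.")
--     if not has_special:
--         missing.append("Agregar al menos un carácter especial permitido (* . - _ @ = | + < > % & # $).")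
--     return missing
-- ===== Notes on version B (the rewrite author's own statement) =====
-- stated objective: simpler
-- what changed: Replaces A's seven independent any/all scans of the password with a single pass that maintains six boolean flags, then assembles the same messages in the same order from the flags.
import Mathlib
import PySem

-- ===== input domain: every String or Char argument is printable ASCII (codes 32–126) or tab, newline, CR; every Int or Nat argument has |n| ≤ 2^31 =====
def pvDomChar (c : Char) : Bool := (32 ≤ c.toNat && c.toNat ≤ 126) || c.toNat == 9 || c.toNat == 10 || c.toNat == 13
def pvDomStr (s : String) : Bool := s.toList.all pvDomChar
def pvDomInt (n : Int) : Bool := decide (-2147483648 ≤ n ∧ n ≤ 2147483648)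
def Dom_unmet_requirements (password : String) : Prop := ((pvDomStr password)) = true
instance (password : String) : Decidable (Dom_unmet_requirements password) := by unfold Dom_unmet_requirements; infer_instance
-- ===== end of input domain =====

-- B replaces A's seven independent any/all scans with one pass maintaining six flags; same messages, same order.

-- shared module constants (same module context for both ports)
def pvAllowedSpecial : List Char := "*.-_@=|+<>%&#$".toList
def pvForbidden : PySem.Set Char := PySem.Set.ofList "ÑñáéíóúÁÉÍÓÚ".toList
def pvAllowed : List Char :=
  "abcdefghijklmnopqrstuvwxyzABCDEFGHIJKLMNOPQRSTUVWXYZ0123456789".toList ++ pvAllowedSpecial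

def pvMsgLen : String := "Tener exactamente 10 caracteres."
def pvMsgForb : String := "No contener Ñ, ñ ni vocales acentuadas."
def pvMsgAllow : String := "Usar únicamente dígitos, letras o los caracteres especiales permitidos."
def pvMsgLower : String := "Incluir al menos una letra minúscula."
def pvMsgUpper : String := "Incluir al menos una letra mayúscula."
def pvMsgDigit : String := "Incorporar al menos un dígito."
def pvMsgSpecial : String := "Agregar al menos un carácter especial permitido (* . - _ @ = | + < > % & # $)."

-- ===== PORT A =====
-- seven independent scans, each 'if' appending its message (transliteration of A)
def unmet_requirements (password : String) : List String :=
  let cs := password.toList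
  (if cs.length ≠ 10 then [pvMsgLen] else []) ++
  (if cs.any (fun ch => PySem.Set.contains pvForbidden ch) then [pvMsgForb] else []) ++
  (if !(cs.all (fun ch => pvAllowed.contains ch)) then [pvMsgAllow] else []) ++
  (if !(cs.any PySem.Chars.islower) then [pvMsgLower] else []) ++
  (if !(cs.any PySem.Chars.isupper) then [pvMsgUpper] else []) ++
  (if !(cs.any PySem.Chars.isdigit) then [pvMsgDigit] else []) ++
  (if !(cs.any (fun ch => pvAllowedSpecial.contains ch)) then [pvMsgSpecial] else [])

-- ===== PORT B =====
-- one pass: (has_forbidden, all_allowed, has_lower, has_upper, has_digit, has_special)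
def pvStep (st : Bool × Bool × Bool × Bool × Bool × Bool) (ch : Char) :
    Bool × Bool × Bool × Bool × Bool × Bool :=
  let (f, a, l, u, d, s) := st
  (f || PySem.Set.contains pvForbidden ch,
   a && pvAllowed.contains ch,
   l || PySem.Chars.islower ch,
   u || PySem.Chars.isupper ch,
   d || PySem.Chars.isdigit ch,
   s || pvAllowedSpecial.contains ch)

def unmet_requirements_alt (password : String) : List String :=
  let cs := password.toList
  let (f, a, l, u, d, s) := cs.foldl pvStep (false, true, false, false, false, false)
  let missing : List String := if cs.length ≠ 10 then [pvMsgLen] else []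
  let missing := if f then missing ++ [pvMsgForb] else missing
  let missing := if !a then missing ++ [pvMsgAllow] else missing
  let missing := if !l then missing ++ [pvMsgLower] else missing
  let missing := if !u then missing ++ [pvMsgUpper] else missing
  let missing := if !d then missing ++ [pvMsgDigit] else missing
  let missing := if !s then missing ++ [pvMsgSpecial] else missing
  missing

-- ===== PRECONDITION & SPEC =====
def Spec_unmet_requirements (password : String) (out : List String) : Prop := out = unmet_requirements_alt password
instance (password : String) (out : List String) : Decidable (Spec_unmet_requirements password out) := by unfold Spec_unmet_requirements; infer_instance

-- ===== CLAIM (what is proved, stated in full; the proofs are below) =====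
def Claim_equal_unmet_requirements : Prop := ∀ (password : String), Dom_unmet_requirements password → Spec_unmet_requirements password (unmet_requirements password)

-- ===== LEMMAS AND PROOFS =====

-- the one-pass fold computes exactly the seven scans' facts
lemma pvStep_foldl (cs : List Char) (f a l u d s : Bool) :
    cs.foldl pvStep (f, a, l, u, d, s) =
      (f || cs.any (fun ch => PySem.Set.contains pvForbidden ch),
       a && cs.all (fun ch => pvAllowed.contains ch),
       l || cs.any PySem.Chars.islower,
       u || cs.any PySem.Chars.isupper,
       d || cs.any PySem.Chars.isdigit,
       s || cs.any (fun ch => pvAllowedSpecial.contains ch)) := by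
  induction cs generalizing f a l u d s with
  | nil => simp
  | cons c cs ih =>
    simp only [List.foldl_cons, pvStep, List.any_cons, List.all_cons]
    rw [ih]
    simp [Bool.or_assoc, Bool.and_assoc]

-- ===== VERDICT (by name: the statement is the Claim_ definition above) =====
theorem unmet_requirements_spec : Claim_equal_unmet_requirements := by
  intro password _
  show _ = _
  simp only [unmet_requirements, unmet_requirements_alt, pvStep_foldl, Bool.false_or,
    Bool.true_and]
  generalize (password.toList.any fun ch => PySem.Set.contains pvForbidden ch) = f
  generalize (password.toList.all fun ch => pvAllowed.contains ch) = a
  generalize password.toList.any PySem.Chars.islower = l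
  generalize password.toList.any PySem.Chars.isupper = u
  generalize password.toList.any PySem.Chars.isdigit = d
  generalize (password.toList.any fun ch => pvAllowedSpecial.contains ch) = s
  by_cases h : password.toList.length ≠ 10 <;>
    cases f <;> cases a <;> cases l <;> cases u <;> cases d <;> cases s <;> simp_all
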